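-- pv_equiv track=rewrite | github.com/njcuk9999/apero-utils | general/apero_reduction_interface/simple_ari.py | clean_profile_name
-- ===== SOURCE A (Python) =====
-- def clean_profile_name(profile_name: str) -> str:
--     """
--     Clean up the profile name
--
--     :param profile_name: str, the profile name
--     :return: str, the cleaned up profile name
--     """
--     # clean up profile name
--     profile_name = profile_name.replace(' ', '_')
--     profile_name = profile_name.replace('-', '_')
--     profile_name = profile_name.replace('(', '_')
--     profile_name = profile_name.replace(')', '_')
--     # remove ugly double underscores
--     while '__' in profile_name:
--         profile_name = profile_name.replace('__', '_')
--     # remove starting and ending underscores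
--     profile_name = profile_name.strip('_')
--     # return cleaned up profile name
--     return profile_name
-- ===== SOURCE B (Python) =====
-- def clean_profile_name(profile_name: str) -> str:
--     """Single left-to-right pass: map separators to '_', collapsing runs, then strip edges."""
--     out = []
--     prev_underscore = False
--     for ch in profile_name:
--         if ch in ' -()_':
--             if not prev_underscore:
--                 out.append('_')
--             prev_underscore = True
--         else:
--             out.append(ch)
--             prev_underscore = False
--     return ''.join(out).strip('_')
-- ===== Notes on version B (the rewrite author's own statement) =====
-- stated objective: alternative
-- what changed: Replaces four sequential str.replace passes plus a repeated collapse-the-doubles while loop with one left-to-right fold that maps separator characters to a single underscore and collapses runs on the fly, then strips the edges.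
import Mathlib
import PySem

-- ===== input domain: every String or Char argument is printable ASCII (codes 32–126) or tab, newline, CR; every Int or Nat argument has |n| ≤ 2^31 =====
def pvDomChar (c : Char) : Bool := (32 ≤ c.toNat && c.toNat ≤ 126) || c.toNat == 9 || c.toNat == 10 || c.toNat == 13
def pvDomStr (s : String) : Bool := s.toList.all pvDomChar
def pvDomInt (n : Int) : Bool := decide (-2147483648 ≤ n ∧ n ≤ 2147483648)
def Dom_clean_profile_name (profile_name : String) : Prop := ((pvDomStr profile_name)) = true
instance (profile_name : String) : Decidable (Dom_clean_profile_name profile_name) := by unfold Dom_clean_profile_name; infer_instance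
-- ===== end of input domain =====

-- B replaces A's four str.replace passes + repeated '__'-collapsing while loop by one
-- left-to-right pass that maps separators to '_' and collapses runs on the fly; same result.

-- ===== PORT A =====
-- one pass of s.replace('__', '_') written structurally (needed by port A's termination proof)
def rep2 : List Char → List Char
  | '_' :: '_' :: t => '_' :: rep2 t
  | c :: t => c :: rep2 t
  | [] => []

theorem rep2_cons_ne (c : Char) (t : List Char) (h : ∀ t1, c = '_' → t = '_' :: t1 → False) :
    rep2 (c :: t) = c :: rep2 t := by
  rw [rep2.eq_def]
  split
  · rename_i t1 heq
    simp at heq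
    exact (h t1 heq.1 heq.2).elim
  · rename_i heq
    cases heq
    rfl
  · rename_i heq; simp at heq

-- PySem's replace with old = "__", new = "_" computes rep2 (needed by port A's termination proof)
theorem replace_dd_go (fuel : Nat) (l acc : List Char) (h : l.length ≤ fuel) :
    PySem.Chars.replace.go ['_', '_'] ['_'] fuel l acc = acc.reverse ++ rep2 l := by
  induction fuel generalizing l acc with
  | zero =>
    have : l = [] := List.length_eq_zero_iff.mp (Nat.le_zero.mp h)
    subst this
    simp [PySem.Chars.replace.go, rep2]
  | succ n ih =>
    match l with
    | [] => simp [PySem.Chars.replace.go, rep2]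
    | [c] =>
      have hpre : List.isPrefixOf ['_', '_'] [c] = false := by
        simp [List.isPrefixOf]
      rw [PySem.Chars.replace.go]
      simp only [hpre, Bool.false_eq_true, if_false]
      rw [ih [] (c :: acc) (by simp)]
      rw [rep2_cons_ne c [] (by intro t1 _ hh; simp at hh)]
      simp [rep2]
    | c1 :: c2 :: t =>
      rw [PySem.Chars.replace.go]
      by_cases h12 : c1 = '_' ∧ c2 = '_'
      · obtain ⟨h1, h2⟩ := h12; subst h1; subst h2
        have hpre : List.isPrefixOf ['_', '_'] ('_' :: '_' :: t) = true := by
          simp [List.isPrefixOf]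
        simp only [hpre, if_true]
        rw [show List.drop (['_', '_'] : List Char).length ('_' :: '_' :: t) = t from rfl,
            show (['_'] : List Char).reverse ++ acc = '_' :: acc from rfl]
        rw [ih t ('_' :: acc) (by simp at h ⊢; omega)]
        simp [rep2]
      · have hpre : List.isPrefixOf ['_', '_'] (c1 :: c2 :: t) = false := by
          simp [List.isPrefixOf]
          intro h1 h2; exact h12 ⟨h1.symm, h2.symm⟩
        simp only [hpre, Bool.false_eq_true, if_false]
        rw [ih (c2 :: t) (c1 :: acc) (by simp at h ⊢; omega)]
        rw [rep2_cons_ne c1 (c2 :: t)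
          (by intro t1 hc1 hc2; injection hc2 with hh _; exact h12 ⟨hc1, hh⟩)]
        simp

theorem replace_dd (l : List Char) :
    PySem.Chars.replace l ['_', '_'] ['_'] = rep2 l := by
  rw [PySem.Chars.replace]
  simp only [List.isEmpty_cons, Bool.false_eq_true, if_false]
  exact replace_dd_go l.length l [] (le_refl _)

theorem rep2_length_le (l : List Char) : (rep2 l).length ≤ l.length := by
  induction l using rep2.induct with
  | case1 t ih => simp [rep2]; omega
  | case2 c t h1 ih => rw [rep2_cons_ne c t h1]; simp; omega
  | case3 => simp [rep2]

-- rep2 strictly shrinks a string containing "__" (needed by port A's termination proof)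
theorem rep2_length_lt : ∀ l : List Char, ['_', '_'] <:+: l → (rep2 l).length < l.length := by
  intro l
  induction l using rep2.induct with
  | case1 t ih =>
    intro _
    have := rep2_length_le t
    simp [rep2]; omega
  | case2 c t h1 ih =>
    intro hinf
    have hinf' : ['_', '_'] <:+: t := by
      rcases (List.infix_cons_iff.mp hinf) with hp | hi
      · exfalso
        obtain ⟨u, hu⟩ := hp
        injection hu with e1 e2
        exact h1 u e1.symm e2.symm
      · exact hi
    have := ih hinf'
    rw [rep2_cons_ne c t h1]
    simp; omega
  | case3 => intro h; simp at h

-- A's while loop: while '__' in s: s = s.replace('__', '_')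
def collapseLoop (l : List Char) : List Char :=
  if PySem.Chars.isIn ['_', '_'] l = true then
    collapseLoop (PySem.Chars.replace l ['_', '_'] ['_'])
  else l
termination_by l.length
decreasing_by
  rw [replace_dd]
  exact rep2_length_lt l ((PySem.Chars.isIn_iff_infix _ _).mp (by assumption))

def clean_profile_name (profile_name : String) : String :=
  let s1 := PySem.Str.replace profile_name " " "_"
  let s2 := PySem.Str.replace s1 "-" "_"
  let s3 := PySem.Str.replace s2 "(" "_"
  let s4 := PySem.Str.replace s3 ")" "_"
  let s5 := String.ofList (collapseLoop s4.toList)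
  PySem.Str.stripChars s5 "_"

-- ===== PORT B =====
def clean_profile_name_alt (profile_name : String) : String :=
  let step := fun (st : List Char × Bool) (ch : Char) =>
    if ch = ' ' ∨ ch = '-' ∨ ch = '(' ∨ ch = ')' ∨ ch = '_' then
      if st.2 then (st.1, true) else (st.1 ++ ['_'], true)
    else (st.1 ++ [ch], false)
  let r := profile_name.toList.foldl step ([], false)
  PySem.Str.stripChars (String.ofList r.1) "_"

-- ===== PRECONDITION & SPEC =====
def Spec_clean_profile_name (profile_name : String) (out : String) : Prop := out = clean_profile_name_alt profile_name
instance (profile_name : String) (out : String) : Decidable (Spec_clean_profile_name profile_name out) := by unfold Spec_clean_profile_name; infer_instance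

-- ===== CLAIM (what is proved, stated in full; the proofs are below) =====
def Claim_equal_clean_profile_name : Prop := ∀ (profile_name : String), Dom_clean_profile_name profile_name → Spec_clean_profile_name profile_name (clean_profile_name profile_name)

-- ===== LEMMAS AND PROOFS =====

-- a single-character replace is a map
theorem replace_single_go (a b : Char) (fuel : Nat) (l acc : List Char) (h : l.length ≤ fuel) :
    PySem.Chars.replace.go [a] [b] fuel l acc =
      acc.reverse ++ l.map (fun c => if c = a then b else c) := by
  induction fuel generalizing l acc with
  | zero =>
    have : l = [] := List.length_eq_zero_iff.mp (Nat.le_zero.mp h)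
    subst this; simp [PySem.Chars.replace.go]
  | succ n ih =>
    match l with
    | [] => simp [PySem.Chars.replace.go]
    | c :: t =>
      rw [PySem.Chars.replace.go]
      by_cases hc : c = a
      · subst hc
        have hpre : List.isPrefixOf [c] (c :: t) = true := by simp [List.isPrefixOf]
        simp only [hpre, if_true]
        rw [show List.drop ([c] : List Char).length (c :: t) = t from rfl,
            show ([b] : List Char).reverse ++ acc = b :: acc from rfl]
        rw [ih t (b :: acc) (by simp at h ⊢; omega)]
        simp
      · have hpre : List.isPrefixOf [a] (c :: t) = false := by
          simp [List.isPrefixOf]; exact fun h' => hc h'.symm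
        simp only [hpre, Bool.false_eq_true, if_false]
        rw [ih t (c :: acc) (by simp at h ⊢; omega)]
        simp [hc]

theorem replace_single (l : List Char) (a b : Char) :
    PySem.Chars.replace l [a] [b] = l.map (fun c => if c = a then b else c) := by
  rw [PySem.Chars.replace]
  simp only [List.isEmpty_cons, Bool.false_eq_true, if_false]
  exact replace_single_go a b l.length l [] (le_refl _)

-- the composite of A's four character maps (and B's separator test)
def sepMap (c : Char) : Char :=
  if c = ' ' ∨ c = '-' ∨ c = '(' ∨ c = ')' ∨ c = '_' then '_' else c

-- run-collapsing pass (canonical form shared by both loops)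
def sqz (prev : Bool) : List Char → List Char
  | [] => []
  | c :: t => if c = '_' then (if prev then sqz true t else '_' :: sqz true t) else c :: sqz false t

theorem sq_rep2 (l : List Char) : ∀ b, sqz b (rep2 l) = sqz b l := by
  induction l using rep2.induct with
  | case1 t ih =>
    intro b
    cases b <;> simp [rep2, sqz, ih]
  | case2 c t h1 ih =>
    intro b
    rw [rep2_cons_ne c t h1]
    by_cases hc : c = '_'
    · subst hc; cases b <;> simp [sqz, ih]
    · simp [sqz, hc, ih]
  | case3 => intro b; simp [rep2]

-- no "__" substring ⇒ sqz is the identity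
theorem sq_id : ∀ (l : List Char) (b : Bool), ¬ (['_', '_'] <:+: l) →
    (b = true → l.head? ≠ some '_') → sqz b l = l := by
  intro l
  induction l with
  | nil => intro b _ _; simp [sqz]
  | cons c t ih =>
    intro b hinf hb
    have hinf' : ¬ (['_', '_'] <:+: t) := fun h => hinf (h.trans (List.suffix_cons c t).isInfix)
    by_cases hc : c = '_'
    · subst hc
      have hb' : b = false := by
        cases b with
        | false => rfl
        | true => exact ((hb rfl) (by simp)).elim
      subst hb'
      have hth : t.head? ≠ some '_' := by
        intro hh
        cases t with
        | nil => simp at hh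
        | cons d u =>
          simp at hh; subst hh
          exact hinf ⟨[], u, by simp⟩
      simp [sqz]
      exact ih true hinf' (fun _ => hth)
    · simp [sqz, hc]
      exact ih false hinf' (by simp)

-- A's while loop computes the run-collapse
theorem collapseLoop_eq_sq (l : List Char) : collapseLoop l = sqz false l := by
  induction l using collapseLoop.induct with
  | case1 l h ih =>
    rw [collapseLoop, if_pos h, ih, replace_dd, sq_rep2]
  | case2 l h =>
    rw [collapseLoop, if_neg h]
    have hfalse : PySem.Chars.isIn ['_', '_'] l = false := by
      cases hh : PySem.Chars.isIn ['_', '_'] l with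
      | false => rfl
      | true => exact absurd (hh ▸ rfl) h
    exact (sq_id l false ((PySem.Chars.isIn_eq_false_iff _ _).mp hfalse) (by simp)).symm

-- B's fold computes sqz of the separator-mapped string
theorem foldl_step_eq_sq (l : List Char) : ∀ (acc : List Char) (prev : Bool),
    (l.foldl
      (fun (st : List Char × Bool) (ch : Char) =>
        if ch = ' ' ∨ ch = '-' ∨ ch = '(' ∨ ch = ')' ∨ ch = '_' then
          if st.2 then (st.1, true) else (st.1 ++ ['_'], true)
        else (st.1 ++ [ch], false)) (acc, prev)).1
    = acc ++ sqz prev (l.map sepMap) := by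
  induction l with
  | nil => intro acc prev; simp [sqz]
  | cons c t ih =>
    intro acc prev
    by_cases hc : c = ' ' ∨ c = '-' ∨ c = '(' ∨ c = ')' ∨ c = '_'
    · have hs : sepMap c = '_' := by simp [sepMap, hc]
      cases prev with
      | true => simp only [List.foldl_cons, hc, if_true]; rw [ih]; simp [hs, sqz]
      | false => simp only [List.foldl_cons, hc, if_true]; rw [ih]; simp [hs, sqz]
    · have hs : sepMap c = c := by simp [sepMap, hc]
      have hcu : ¬ c = '_' := fun h => hc (Or.inr (Or.inr (Or.inr (Or.inr h))))
      simp only [List.foldl_cons, hc, if_false]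
      rw [ih]; simp [hs, sqz, hcu]

-- the four single-character maps compose to sepMap
theorem map_four (l : List Char) :
    ((((l.map (fun c => if c = ' ' then '_' else c)).map
        (fun c => if c = '-' then '_' else c)).map
        (fun c => if c = '(' then '_' else c)).map
        (fun c => if c = ')' then '_' else c)) = l.map sepMap := by
  simp only [List.map_map]
  apply List.map_congr_left
  intro c _
  simp only [Function.comp, sepMap]
  split_ifs <;> simp_all

-- ===== VERDICT (by name: the statement is the Claim_ definition above) =====
theorem clean_profile_name_spec : Claim_equal_clean_profile_name := by
  intro s _
  simp only [Spec_clean_profile_name, clean_profile_name, clean_profile_name_alt]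
  congr 1
  congr 1
  have h4 : (PySem.Str.replace (PySem.Str.replace (PySem.Str.replace
      (PySem.Str.replace s " " "_") "-" "_") "(" "_") ")" "_").toList = s.toList.map sepMap := by
    simp only [PySem.Str.toList_replace]
    rw [show (" " : String).toList = [' '] from rfl, show ("-" : String).toList = ['-'] from rfl,
        show ("(" : String).toList = ['('] from rfl, show (")" : String).toList = [')'] from rfl,
        show ("_" : String).toList = ['_'] from rfl]
    rw [replace_single, replace_single, replace_single, replace_single]
    exact map_four s.toList
  rw [h4, collapseLoop_eq_sq]
  rw [foldl_step_eq_sq s.toList [] false]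
  simp
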